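-- pv_equiv track=rewrite | github.com/bmilojkovic/argus-h2-app | src/argus_parsing_familiars.py | count_familiar_level
-- ===== SOURCE A (Python) =====
-- familiar_level_trait_map = {
--     "HealthFamiliar": {
--         "HealthFamiliar",
--         "FamiliarFrogResourceBonus",
--         "FamiliarFrogDamage",
--     },
--     "CritFamiliar": {
--         "CritFamiliar",
--         "FamiliarRavenResourceBonus",
--         "FamiliarRavenAttackDuration",
--     },
--     "LastStandFamiliar": {
--         "LastStandFamiliar",
--         "FamiliarCatResourceBonus",
--         "FamiliarCatAttacks",
--     },
--     "DigFamiliar": {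
--         "DigFamiliar",
--         "FamiliarHoundResourceBonus",
--         "FamiliarHoundBarkDuration",
--     },
--     "DodgeFamiliar": {
--         "DodgeFamiliar",
--         "FamiliarPolecatResourceBonus",
--         "FamiliarPolecatDamage",
--     },
-- }
--
-- def count_familiar_level(familiar_name, hero_traits):
--     if familiar_name not in familiar_level_trait_map:
--         return 1
--
--     possible_familiar_traits = familiar_level_trait_map[familiar_name]
--
--     count = 1
--
--     for hero_trait in hero_traits:
--         if (
--             "Name" in hero_trait
--             and "StackNum" in hero_trait
--             and hero_trait["Name"] in possible_familiar_traits
--         ):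
--             count = count + int(hero_trait["StackNum"]) - 1
--
--     return count
-- ===== SOURCE B (Python) =====
-- familiar_level_trait_map = {
--     "HealthFamiliar": {
--         "HealthFamiliar",
--         "FamiliarFrogResourceBonus",
--         "FamiliarFrogDamage",
--     },
--     "CritFamiliar": {
--         "CritFamiliar",
--         "FamiliarRavenResourceBonus",
--         "FamiliarRavenAttackDuration",
--     },
--     "LastStandFamiliar": {
--         "LastStandFamiliar",
--         "FamiliarCatResourceBonus",
--         "FamiliarCatAttacks",
--     },
--     "DigFamiliar": {
--         "DigFamiliar",
--         "FamiliarHoundResourceBonus",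
--         "FamiliarHoundBarkDuration",
--     },
--     "DodgeFamiliar": {
--         "DodgeFamiliar",
--         "FamiliarPolecatResourceBonus",
--         "FamiliarPolecatDamage",
--     },
-- }
--
--
-- def count_familiar_level(familiar_name, hero_traits):
--     possible = familiar_level_trait_map.get(familiar_name)
--     if possible is None:
--         return 1
--
--     # group the StackNum strings of every named trait by trait name
--     stacks = {}
--     for trait in hero_traits:
--         if "Name" in trait and "StackNum" in trait:
--             stacks.setdefault(trait["Name"], []).append(trait["StackNum"])
--
--     return 1 + sum(int(s) - 1 for name in possible for s in stacks.get(name, []))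
-- ===== Notes on version B (the rewrite author's own statement) =====
-- stated objective: alternative
-- what changed: B replaces A's single filtered accumulation loop by a grouping pass (a dict mapping trait name to its list of StackNum strings, built with setdefault) followed by a sum over the familiar's possible trait names; Pre_ excludes only inputs where int(StackNum) raises ValueError in both programs.
import Mathlib
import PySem

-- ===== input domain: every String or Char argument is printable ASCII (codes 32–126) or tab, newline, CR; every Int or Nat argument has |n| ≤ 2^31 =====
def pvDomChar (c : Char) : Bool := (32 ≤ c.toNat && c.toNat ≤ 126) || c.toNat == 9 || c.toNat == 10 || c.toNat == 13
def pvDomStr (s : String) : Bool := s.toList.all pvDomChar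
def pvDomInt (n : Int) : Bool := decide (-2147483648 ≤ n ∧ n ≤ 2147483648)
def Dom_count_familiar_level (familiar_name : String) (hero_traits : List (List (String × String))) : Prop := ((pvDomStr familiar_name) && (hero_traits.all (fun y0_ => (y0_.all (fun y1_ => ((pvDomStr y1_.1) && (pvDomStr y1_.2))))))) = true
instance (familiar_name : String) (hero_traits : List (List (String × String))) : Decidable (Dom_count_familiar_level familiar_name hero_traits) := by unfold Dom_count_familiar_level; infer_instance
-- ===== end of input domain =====

-- B groups StackNum strings by trait name in a dict first, then sums over the familiar's possible
-- trait names — a different decomposition from A's single filtered accumulation loop ("alternative").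

-- the module constant familiar_level_trait_map (dict of sets; sets kept in source order, used for membership only)
def familiarLevelTraitMap : PySem.Dict String (List String) := PySem.Dict.mk
  [ ("HealthFamiliar",    ["HealthFamiliar", "FamiliarFrogResourceBonus", "FamiliarFrogDamage"]),
    ("CritFamiliar",      ["CritFamiliar", "FamiliarRavenResourceBonus", "FamiliarRavenAttackDuration"]),
    ("LastStandFamiliar", ["LastStandFamiliar", "FamiliarCatResourceBonus", "FamiliarCatAttacks"]),
    ("DigFamiliar",       ["DigFamiliar", "FamiliarHoundResourceBonus", "FamiliarHoundBarkDuration"]),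
    ("DodgeFamiliar",     ["DodgeFamiliar", "FamiliarPolecatResourceBonus", "FamiliarPolecatDamage"]) ]

-- ===== PORT A =====
def count_familiar_level (familiar_name : String) (hero_traits : List (List (String × String))) : Int :=
  match familiarLevelTraitMap.get? familiar_name with
  | none => 1
  | some possible_familiar_traits =>
      hero_traits.foldl (fun count hero_trait =>
        match (PySem.Dict.mk hero_trait).get? "Name", (PySem.Dict.mk hero_trait).get? "StackNum" with
        | some nm, some st =>
            if possible_familiar_traits.contains nm then
              count + ((PySem.Int.ofStr? st).getD 0) - 1    -- Pre_ guarantees int(StackNum) parses here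
            else count
        | _, _ => count) 1

-- ===== PORT B =====
-- the grouping pass of B: stacks = {}; for trait ...: stacks.setdefault(trait["Name"], []).append(trait["StackNum"])
-- one iteration: if "Name" in trait and "StackNum" in trait: stacks.setdefault(trait["Name"], []).append(trait["StackNum"])
def stackStep (d : PySem.Dict String (List String)) (trait : List (String × String)) : PySem.Dict String (List String) :=
  let t := PySem.Dict.mk trait
  if t.contains "Name" && t.contains "StackNum" then
    d.modify ((t.get? "Name").getD "") [] (fun l => l ++ [(t.get? "StackNum").getD ""])   -- the getD defaults are unreachable
  else d

def buildStacks (hero_traits : List (List (String × String))) : PySem.Dict String (List String) :=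
  hero_traits.foldl stackStep PySem.Dict.empty
def count_familiar_level_alt (familiar_name : String) (hero_traits : List (List (String × String))) : Int :=
  match familiarLevelTraitMap.get? familiar_name with
  | none => 1
  | some possible =>
      1 + ((possible.flatMap (fun name => (buildStacks hero_traits).getD name [])).map
              (fun s => ((PySem.Int.ofStr? s).getD 0) - 1)).sum

-- ===== PRECONDITION & SPEC =====
def preCheckTrait (possible : List String) (trait : List (String × String)) : Bool :=
  let t := PySem.Dict.mk trait
  if t.contains "Name" && t.contains "StackNum" then
    !(possible.contains ((t.get? "Name").getD "")) || (PySem.Int.ofStr? ((t.get? "StackNum").getD "")).isSome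
  else true

-- Pre_ excludes exactly the inputs where int(StackNum) raises ValueError (a counted trait whose
-- StackNum string is not a valid integer literal); both A and B raise there.
def Pre_count_familiar_level (familiar_name : String) (hero_traits : List (List (String × String))) : Prop :=
  (match familiarLevelTraitMap.get? familiar_name with
   | some possible => hero_traits.all (preCheckTrait possible)
   | none => true) = true
instance (familiar_name : String) (hero_traits : List (List (String × String))) : Decidable (Pre_count_familiar_level familiar_name hero_traits) := by unfold Pre_count_familiar_level; infer_instance

def pvWitness_count_familiar_level : String × (List (List (String × String))) :=
  ("HealthFamiliar", [[("Name", "FamiliarFrogDamage"), ("StackNum", "3")], [("Name", "Other")]])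

def Spec_count_familiar_level (familiar_name : String) (hero_traits : List (List (String × String))) (out : Int) : Prop := out = count_familiar_level_alt familiar_name hero_traits
instance (familiar_name : String) (hero_traits : List (List (String × String))) (out : Int) : Decidable (Spec_count_familiar_level familiar_name hero_traits out) := by unfold Spec_count_familiar_level; infer_instance

-- ===== CLAIM (what is proved, stated in full; the proofs are below) =====
def Claim_equal_count_familiar_level : Prop := ∀ (familiar_name : String) (hero_traits : List (List (String × String))), Dom_count_familiar_level familiar_name hero_traits → Pre_count_familiar_level familiar_name hero_traits → Spec_count_familiar_level familiar_name hero_traits (count_familiar_level familiar_name hero_traits)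

-- ===== LEMMAS AND PROOFS =====

-- the per-trait contribution of A's loop body
def contrib (possible : List String) (trait : List (String × String)) : Int :=
  match (PySem.Dict.mk trait).get? "Name", (PySem.Dict.mk trait).get? "StackNum" with
  | some nm, some st => if possible.contains nm then ((PySem.Int.ofStr? st).getD 0) - 1 else 0
  | _, _ => 0

-- the StackNum strings that B's dict accumulates under a given name
def groups (hero_traits : List (List (String × String))) (name : String) : List String :=
  hero_traits.filterMap (fun trait =>
    match (PySem.Dict.mk trait).get? "Name", (PySem.Dict.mk trait).get? "StackNum" with
    | some nm, some st => if nm = name then some st else none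
    | _, _ => none)

theorem groups_cons (t : List (String × String)) (ht : List (List (String × String))) (name : String) :
    groups (t :: ht) name =
      (match (PySem.Dict.mk t).get? "Name", (PySem.Dict.mk t).get? "StackNum" with
       | some nm, some st => if nm = name then st :: groups ht name else groups ht name
       | _, _ => groups ht name) := by
  rcases h1 : (PySem.Dict.mk t).get? "Name" with _ | nm <;>
    rcases h2 : (PySem.Dict.mk t).get? "StackNum" with _ | st <;>
      simp only [groups, List.filterMap_cons, h1, h2]
  by_cases hn : nm = name <;> simp [hn]

theorem A_foldl_eq_sum (possible : List String) (ht : List (List (String × String))) (c : Int) :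
    ht.foldl (fun count hero_trait =>
        match (PySem.Dict.mk hero_trait).get? "Name", (PySem.Dict.mk hero_trait).get? "StackNum" with
        | some nm, some st =>
            if possible.contains nm then count + ((PySem.Int.ofStr? st).getD 0) - 1 else count
        | _, _ => count) c
      = c + (ht.map (contrib possible)).sum := by
  induction ht generalizing c with
  | nil => simp
  | cons t rest ih =>
      simp only [List.foldl_cons, List.map_cons, List.sum_cons, contrib]
      rcases (PySem.Dict.mk t).get? "Name" with _ | nm <;>
        rcases (PySem.Dict.mk t).get? "StackNum" with _ | st <;>
          simp only [ih] <;> try ring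
      split <;> ring

theorem dict_contains_eq_isSome {ν : Type} (d : PySem.Dict String ν) (k : String) :
    d.contains k = (d.get? k).isSome := by
  cases h : d.get? k with
  | none => simp [(PySem.Dict.get?_eq_none_iff_contains d k).mp h]
  | some v =>
      simp only [Option.isSome_some]
      by_contra hc
      have : d.get? k = none := (PySem.Dict.get?_eq_none_iff_contains d k).mpr (by simpa using hc)
      simp [h] at this

theorem stackStep_skip (d : PySem.Dict String (List String)) (trait : List (String × String))
    (h : (PySem.Dict.mk trait).get? "Name" = none ∨ (PySem.Dict.mk trait).get? "StackNum" = none) :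
    stackStep d trait = d := by
  rcases h with h | h <;>
    simp only [stackStep, dict_contains_eq_isSome, h, Option.isSome_none,
      Bool.false_and, Bool.and_false] <;> simp

theorem stackStep_app (d : PySem.Dict String (List String)) (trait : List (String × String))
    (nm st : String) (h1 : (PySem.Dict.mk trait).get? "Name" = some nm)
    (h2 : (PySem.Dict.mk trait).get? "StackNum" = some st) :
    stackStep d trait = d.modify nm [] (fun l => l ++ [st]) := by
  simp only [stackStep, dict_contains_eq_isSome, h1, h2, Option.isSome_some, Bool.and_self,
    Option.getD_some] <;> simp

theorem stacks_getD (ht : List (List (String × String))) (d : PySem.Dict String (List String)) (name : String) :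
    (ht.foldl stackStep d).getD name [] = d.getD name [] ++ groups ht name := by
  induction ht generalizing d with
  | nil => simp [groups]
  | cons t rest ih =>
      rw [List.foldl_cons]
      rcases h1 : (PySem.Dict.mk t).get? "Name" with _ | nm <;>
        rcases h2 : (PySem.Dict.mk t).get? "StackNum" with _ | st <;>
          simp only [groups_cons, h1, h2]
      · rw [stackStep_skip d t (Or.inl h1), ih]
      · rw [stackStep_skip d t (Or.inl h1), ih]
      · rw [stackStep_skip d t (Or.inr h2), ih]
      · rw [stackStep_app d t nm st h1 h2, ih, PySem.Dict.getD_modify]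
        split
        · next h => subst h; simp
        · next h => rw [if_neg (by exact fun hc => h hc.symm)]

-- Σ_{nm ∈ possible} (if nm = n then v else 0) collapses under Nodup
theorem buildStacks_getD (ht : List (List (String × String))) (name : String) :
    (buildStacks ht).getD name [] = groups ht name := by
  rw [buildStacks, stacks_getD]; simp

theorem sum_ite_eq_mem (possible : List String) (hnd : possible.Nodup) (n : String) (v : Int) :
    (possible.map (fun nm => if n = nm then v else 0)).sum
      = if possible.contains n then v else 0 := by
  induction possible with
  | nil => simp
  | cons p rest ih =>
      rcases List.nodup_cons.mp hnd with ⟨hp, hrest⟩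
      simp only [List.map_cons, List.sum_cons, ih hrest, List.contains_cons]
      by_cases h : n = p
      · subst h
        simp [List.contains_eq_mem, hp]
      · simp [h]

theorem sum_groups_eq_sum_contrib (possible : List String) (hnd : possible.Nodup)
    (ht : List (List (String × String))) :
    (possible.map (fun name => ((groups ht name).map (fun s => ((PySem.Int.ofStr? s).getD 0) - 1)).sum)).sum
      = (ht.map (contrib possible)).sum := by
  induction ht with
  | nil => simp [groups]
  | cons t rest ih =>
      simp only [List.map_cons, List.sum_cons]
      rw [← ih]
      simp only [groups_cons, contrib]
      rcases (PySem.Dict.mk t).get? "Name" with _ | nm <;>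
        rcases (PySem.Dict.mk t).get? "StackNum" with _ | st
      · simp
      · simp
      · simp
      · have key : (possible.map (fun name =>
            (((if nm = name then st :: groups rest name else groups rest name).map
              (fun s => ((PySem.Int.ofStr? s).getD 0) - 1)).sum)))
          = possible.map (fun name =>
              (if nm = name then ((PySem.Int.ofStr? st).getD 0) - 1 else 0)
                + ((groups rest name).map (fun s => ((PySem.Int.ofStr? s).getD 0) - 1)).sum) := by
          apply List.map_congr_left; intro name _
          split <;> simp
        simp only [key]
        rw [List.sum_map_add, sum_ite_eq_mem possible hnd nm]

theorem possible_nodup (fn : String) (possible : List String)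
    (h : familiarLevelTraitMap.get? fn = some possible) : possible.Nodup := by
  simp only [familiarLevelTraitMap, PySem.Dict.get?_mk_cons] at h
  repeat' split at h
  all_goals try (injection h with h'; subst h'; decide)
  all_goals simp [PySem.Dict.get?] at h

-- ===== VERDICT (by name: the statement is the Claim_ definition above) =====
theorem count_familiar_level_spec : Claim_equal_count_familiar_level := by
  intro fn ht _ _
  unfold Spec_count_familiar_level count_familiar_level count_familiar_level_alt
  rcases h : familiarLevelTraitMap.get? fn with _ | possible
  · rfl
  · simp only [A_foldl_eq_sum, buildStacks_getD]
    rw [List.map_flatMap, List.flatMap_def, List.sum_flatten, List.map_map]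
    simp only [Function.comp_def]
    rw [sum_groups_eq_sum_contrib possible (possible_nodup fn possible h)]
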